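-- pv_equiv track=rewrite | github.com/helpingstar/algorithmstudy | python/Unsolved_Problem/BOJ_9495.py | get_highest_score
-- ===== SOURCE A (Python) =====
-- def get_highest_score(matrix, n):
--     if n == 1:
--         return max(matrix[0][0], matrix[1][0])
--     if n == 2:
--         return max(matrix[0][0] + matrix[1][1], matrix[1][0] + matrix[0][1])
--     score = []
--     for _ in range(2):
--         score.append([0] * n)
--     score[0][0], score[1][0] = matrix[0][0], matrix[1][0]
--     score[0][1], score[1][1] = matrix[0][1] + matrix[1][0], matrix[0][0] + matrix[1][1]
--     for i in range(2, n):
--         score[0][i] = max(score[1][i-2], score[1][i-1]) + matrix[0][i]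
--         score[1][i] = max(score[0][i-2], score[1][i-1]) + matrix[1][i]
--     return max(score[0][n-1], score[1][n-1])
-- ===== SOURCE B (Python) =====
-- def get_highest_score(matrix, n):
--     if n == 1:
--         return max(matrix[0][0], matrix[1][0])
--     memo = {}
--
--     def f(r, i):
--         # f(r, i) = best score ending at cell (r, i)
--         if (r, i) not in memo:
--             if i == 0:
--                 memo[(r, i)] = matrix[r][0]
--             elif i == 1:
--                 memo[(r, i)] = matrix[0][1] + matrix[1][0] if r == 0 else matrix[0][0] + matrix[1][1]
--             elif r == 0:
--                 memo[(r, i)] = max(f(1, i - 2), f(1, i - 1)) + matrix[0][i]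
--             else:
--                 memo[(r, i)] = max(f(0, i - 2), f(1, i - 1)) + matrix[1][i]
--         return memo[(r, i)]
--
--     return max(f(0, n - 1), f(1, n - 1))
-- ===== Notes on version B (the rewrite author's own statement) =====
-- stated objective: alternative
-- what changed: B replaces A's bottom-up 2xn table fill (and its separate n==2 branch) by top-down memoized recursion f(r,i) on cells, evaluated on demand from the last column.
import Mathlib
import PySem

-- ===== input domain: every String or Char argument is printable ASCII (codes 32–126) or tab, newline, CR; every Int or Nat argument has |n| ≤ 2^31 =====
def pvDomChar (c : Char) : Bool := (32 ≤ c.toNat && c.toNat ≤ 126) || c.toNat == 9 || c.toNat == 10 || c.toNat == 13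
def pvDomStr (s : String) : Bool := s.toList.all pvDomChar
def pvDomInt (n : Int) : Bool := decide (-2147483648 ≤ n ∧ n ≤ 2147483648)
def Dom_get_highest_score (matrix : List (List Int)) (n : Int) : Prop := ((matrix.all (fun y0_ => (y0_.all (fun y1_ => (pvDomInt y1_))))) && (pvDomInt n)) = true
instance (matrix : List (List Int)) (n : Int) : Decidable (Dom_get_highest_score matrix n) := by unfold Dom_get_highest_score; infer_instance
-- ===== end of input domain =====

-- B replaces A's bottom-up 2×n score table (and its separate n==2 branch) by top-down
-- recursion f(r, i) on cells, evaluated on demand from the last column; Source B memoizes f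
-- in a dict, which only caches the values of this pure recursion, so the port of B is the
-- same recursion with the cache-lookup skipped (identical value at every call).
-- Equality of the return value is proved on Pre_ (in-range inputs).

-- xs[i]: exact under Pre_ (every index the programs use is in range there)
def pvIdx (xs : List Int) (i : Int) : Int := PySem.List.pyGetD xs i 0

-- ===== PORT A =====
-- body of A's for-loop (score[0][i] then score[1][i] assigned in place)
def stepA (m0 m1 : List Int) (sc : List (List Int)) (i : Int) : List (List Int) :=
  let sc := sc.set 0 ((sc.getD 0 []).set i.toNat
    (max (pvIdx (sc.getD 1 []) (i-2)) (pvIdx (sc.getD 1 []) (i-1)) + pvIdx m0 i))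
  let sc := sc.set 1 ((sc.getD 1 []).set i.toNat
    (max (pvIdx (sc.getD 0 []) (i-2)) (pvIdx (sc.getD 1 []) (i-1)) + pvIdx m1 i))
  sc

def get_highest_score (matrix : List (List Int)) (n : Int) : Int :=
  if n = 1 then
    max (pvIdx (PySem.List.pyGetD matrix 0 []) 0) (pvIdx (PySem.List.pyGetD matrix 1 []) 0)
  else if n = 2 then
    max (pvIdx (PySem.List.pyGetD matrix 0 []) 0 + pvIdx (PySem.List.pyGetD matrix 1 []) 1)
        (pvIdx (PySem.List.pyGetD matrix 1 []) 0 + pvIdx (PySem.List.pyGetD matrix 0 []) 1)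
  else
    -- score = []; for _ in range(2): score.append([0] * n)
    let score : List (List Int) := (List.range 2).foldl (fun sc _ => sc ++ [List.replicate n.toNat 0]) []
    -- score[0][0], score[1][0] = matrix[0][0], matrix[1][0]
    let score := score.set 0 ((score.getD 0 []).set 0 (pvIdx (PySem.List.pyGetD matrix 0 []) 0))
    let score := score.set 1 ((score.getD 1 []).set 0 (pvIdx (PySem.List.pyGetD matrix 1 []) 0))
    -- score[0][1], score[1][1] = matrix[0][1] + matrix[1][0], matrix[0][0] + matrix[1][1]
    let score := score.set 0 ((score.getD 0 []).set 1 (pvIdx (PySem.List.pyGetD matrix 0 []) 1 + pvIdx (PySem.List.pyGetD matrix 1 []) 0))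
    let score := score.set 1 ((score.getD 1 []).set 1 (pvIdx (PySem.List.pyGetD matrix 0 []) 0 + pvIdx (PySem.List.pyGetD matrix 1 []) 1))
    -- for i in range(2, n): score[0][i] = …; score[1][i] = …
    let score := (PySem.List.pyRange 2 n 1).foldl
      (stepA (PySem.List.pyGetD matrix 0 []) (PySem.List.pyGetD matrix 1 [])) score
    max (pvIdx (score.getD 0 []) (n-1)) (pvIdx (score.getD 1 []) (n-1))

-- ===== PORT B =====
-- Source B's inner f(r, i): same branches in the same order; the memo dict of Source B only caches
-- the values of this pure recursion and is omitted (i is the nonnegative column index)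
def fB (matrix : List (List Int)) : Int → Nat → Int
  | r, 0 => pvIdx (PySem.List.pyGetD matrix r []) 0
  | r, 1 =>
      if r = 0 then pvIdx (PySem.List.pyGetD matrix 0 []) 1 + pvIdx (PySem.List.pyGetD matrix 1 []) 0
      else pvIdx (PySem.List.pyGetD matrix 0 []) 0 + pvIdx (PySem.List.pyGetD matrix 1 []) 1
  | r, (i+2) =>
      if r = 0 then max (fB matrix 1 i) (fB matrix 1 (i+1)) + pvIdx (PySem.List.pyGetD matrix 0 []) (i+2)
      else max (fB matrix 0 i) (fB matrix 1 (i+1)) + pvIdx (PySem.List.pyGetD matrix 1 []) (i+2)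

def get_highest_score_alt (matrix : List (List Int)) (n : Int) : Int :=
  if n = 1 then
    max (pvIdx (PySem.List.pyGetD matrix 0 []) 0) (pvIdx (PySem.List.pyGetD matrix 1 []) 0)
  else
    max (fB matrix 0 (n-1).toNat) (fB matrix 1 (n-1).toNat)

-- ===== PRECONDITION & SPEC =====
-- exactly the inputs on which A returns: two rows exist and both reach column n-1 (n ≥ 1)
def Pre_get_highest_score (matrix : List (List Int)) (n : Int) : Prop :=
  2 ≤ matrix.length ∧ 1 ≤ n ∧ n ≤ ((matrix.getD 0 []).length : Int) ∧ n ≤ ((matrix.getD 1 []).length : Int)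
instance (matrix : List (List Int)) (n : Int) : Decidable (Pre_get_highest_score matrix n) := by
  unfold Pre_get_highest_score; infer_instance
def pvWitness_get_highest_score : List (List Int) × Int := ([[1, 2, 3], [4, 5, 6]], 3)

def Spec_get_highest_score (matrix : List (List Int)) (n : Int) (out : Int) : Prop := out = get_highest_score_alt matrix n
instance (matrix : List (List Int)) (n : Int) (out : Int) : Decidable (Spec_get_highest_score matrix n out) := by unfold Spec_get_highest_score; infer_instance

-- ===== CLAIM (what is proved, stated in full; the proofs are below) =====
def Claim_equal_get_highest_score : Prop := ∀ (matrix : List (List Int)) (n : Int), Dom_get_highest_score matrix n → Pre_get_highest_score matrix n → Spec_get_highest_score matrix n (get_highest_score matrix n)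

-- ===== LEMMAS AND PROOFS =====

-- reference recurrence: gRef i = (score[0][i], score[1][i])
def gRef (m0 m1 : List Int) : Nat → Int × Int
  | 0 => (pvIdx m0 0, pvIdx m1 0)
  | 1 => (pvIdx m0 1 + pvIdx m1 0, pvIdx m0 0 + pvIdx m1 1)
  | (i+2) => (max (gRef m0 m1 i).2 (gRef m0 m1 (i+1)).2 + pvIdx m0 (i+2),
              max (gRef m0 m1 i).1 (gRef m0 m1 (i+1)).2 + pvIdx m1 (i+2))

-- B's recursion computes exactly the reference recurrence, both rows at once
theorem fB_eq_gRef (matrix : List (List Int)) (i : Nat) :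
    fB matrix 0 i = (gRef (PySem.List.pyGetD matrix 0 []) (PySem.List.pyGetD matrix 1 []) i).1
    ∧ fB matrix 1 i = (gRef (PySem.List.pyGetD matrix 0 []) (PySem.List.pyGetD matrix 1 []) i).2 := by
  induction i using Nat.strong_induction_on with
  | h i ih =>
    match i with
    | 0 => constructor <;> rfl
    | 1 => constructor <;> rfl
    | (k+2) =>
      obtain ⟨h0a, h1a⟩ := ih k (by omega)
      obtain ⟨h0b, h1b⟩ := ih (k+1) (by omega)
      constructor
      · show (if (0:Int) = 0 then _ else _) = _
        rw [if_pos rfl, h1a, h1b]; rfl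
      · show (if (1:Int) = 0 then _ else _) = _
        rw [if_neg (by norm_num), h0a, h1b]; rfl

theorem getD_set_ne (l : List Int) (i j : Nat) (a d : Int) (h : i ≠ j) :
    (l.set i a).getD j d = l.getD j d := by
  simp [List.getD, List.getElem?_set_ne h]

theorem getD_set_self (l : List Int) (i : Nat) (a d : Int) (h : i < l.length) :
    (l.set i a).getD i d = a := by
  simp [List.getD, h]

theorem a_loop (m0 m1 : List Int) (N k : Nat) (hk : k + 2 ≤ N)
    (s0 s1 : List Int) (h0 : s0.length = N) (h1 : s1.length = N)
    (hg0 : ∀ j, j < k + 2 → s0.getD j 0 = (gRef m0 m1 j).1)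
    (hg1 : ∀ j, j < k + 2 → s1.getD j 0 = (gRef m0 m1 j).2) :
    ∃ t0 t1 : List Int,
      (PySem.List.pyRange (2 + (k : Int)) (N : Int) 1).foldl (stepA m0 m1) [s0, s1]
      = [t0, t1] ∧ (∀ j, j < N → t0.getD j 0 = (gRef m0 m1 j).1)
                 ∧ (∀ j, j < N → t1.getD j 0 = (gRef m0 m1 j).2) := by
  induction hd : N - (k + 2) generalizing k s0 s1 with
  | zero =>
    rw [PySem.List.pyRange_one_eq_nil (by omega)]
    exact ⟨s0, s1, rfl, fun j hj => hg0 j (by omega), fun j hj => hg1 j (by omega)⟩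
  | succ d ih =>
    have hlt : k + 2 < N := by omega
    rw [PySem.List.pyRange_one_cons (by omega), List.foldl_cons]
    have e2 : ((2:Int) + (k:Int)).toNat = k + 2 := by omega
    have em2 : (2:Int) + (k:Int) - 2 = ((k:Nat) : Int) := by ring
    have em1 : (2:Int) + (k:Int) - 1 = (((k+1:Nat)) : Int) := by push_cast; ring_nf
    have hg1a : pvIdx s1 ((k:Nat):Int) = (gRef m0 m1 k).2 := by
      unfold pvIdx; rw [PySem.List.pyGetD_natCast]; exact hg1 k (by omega)
    have hg1b : pvIdx s1 (((k+1:Nat)):Int) = (gRef m0 m1 (k+1)).2 := by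
      unfold pvIdx; rw [PySem.List.pyGetD_natCast]; exact hg1 (k+1) (by omega)
    have h2k : (2:Int) + (k:Int) = ((k+2 : Nat) : Int) := by push_cast; ring
    have hg0a : ∀ v : Int, pvIdx (s0.set (k+2) v) ((k:Nat):Int) = (gRef m0 m1 k).1 := by
      intro v
      unfold pvIdx; rw [PySem.List.pyGetD_natCast, getD_set_ne _ _ _ _ _ (by omega)]
      exact hg0 k (by omega)
    have hstep : stepA m0 m1 [s0, s1] (2 + (k:Int))
        = [s0.set (k+2) ((gRef m0 m1 (k+2)).1), s1.set (k+2) ((gRef m0 m1 (k+2)).2)] := by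
      simp only [stepA, List.getD_cons_zero, List.getD_cons_succ, List.set_cons_zero,
        List.set_cons_succ, e2, em2, em1, hg1a, hg1b, hg0a]
      rw [h2k]
      rfl
    rw [hstep]
    have hrange : (2:Int) + (k:Int) + 1 = 2 + ((k+1 : Nat) : Int) := by push_cast; ring
    rw [hrange]
    apply ih (k+1) (by omega) _ _ (by simp [h0]) (by simp [h1])
    · intro j hj
      by_cases hje : j = k + 2
      · subst hje; rw [getD_set_self _ _ _ _ (by omega)]
      · rw [getD_set_ne _ _ _ _ _ (by omega)]; exact hg0 j (by omega)
    · intro j hj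
      by_cases hje : j = k + 2
      · subst hje; rw [getD_set_self _ _ _ _ (by omega)]
      · rw [getD_set_ne _ _ _ _ _ (by omega)]; exact hg1 j (by omega)
    · omega

-- ===== VERDICT (by name: the statement is the Claim_ definition above) =====
theorem get_highest_score_spec : Claim_equal_get_highest_score := by
  intro matrix n _ hpre
  unfold Spec_get_highest_score
  obtain ⟨hm, hn1, hl0, hl1⟩ := hpre
  set m0 := PySem.List.pyGetD matrix 0 [] with hm0
  set m1 := PySem.List.pyGetD matrix 1 [] with hm1
  by_cases h1 : n = 1
  · subst h1; rfl
  · have hB : get_highest_score_alt matrix n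
        = max ((gRef m0 m1 (n-1).toNat).1) ((gRef m0 m1 (n-1).toNat).2) := by
      simp only [get_highest_score_alt, if_neg h1]
      rw [(fB_eq_gRef matrix (n-1).toNat).1, (fB_eq_gRef matrix (n-1).toNat).2]
    by_cases h2 : n = 2
    · subst h2
      rw [hB, show ((2:Int)-1).toNat = 1 from rfl]
      show get_highest_score matrix 2 = max (gRef m0 m1 1).1 (gRef m0 m1 1).2
      simp only [get_highest_score, gRef, ← hm0, ← hm1]
      norm_num
      omega
    · -- n ≥ 3
      have hn3 : 3 ≤ n := by omega
      set N := n.toNat with hNdef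
      have hN : (N : Int) = n := by omega
      have hN3 : 3 ≤ N := by omega
      have hlen0 : m0.length = (matrix.getD 0 []).length := by
        rw [hm0, PySem.List.pyGetD_zero]
      have hlen1 : m1.length = (matrix.getD 1 []).length := by
        rw [hm1]
        rcases matrix with _ | ⟨a, _ | ⟨b, t⟩⟩ <;>
          simp_all [PySem.List.pyGetD, PySem.List.pyGet?, PySem.List.pyIdx?]
      set s0i : List Int := ((List.replicate N 0).set 0 (pvIdx m0 0)).set 1 (pvIdx m0 1 + pvIdx m1 0) with hs0i
      set s1i : List Int := ((List.replicate N 0).set 0 (pvIdx m1 0)).set 1 (pvIdx m0 0 + pvIdx m1 1) with hs1i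
      have hA : get_highest_score matrix n =
          max (pvIdx (((PySem.List.pyRange 2 n 1).foldl (stepA m0 m1) [s0i, s1i]).getD 0 []) (n-1))
              (pvIdx (((PySem.List.pyRange 2 n 1).foldl (stepA m0 m1) [s0i, s1i]).getD 1 []) (n-1)) := by
        simp only [get_highest_score, if_neg h1, if_neg h2, hs0i, hs1i, hm0, hm1, hNdef]
        rfl
      have hg0i : ∀ j, j < 0 + 2 → s0i.getD j 0 = (gRef m0 m1 j).1 := by
        intro j hj
        interval_cases j
        · rw [hs0i, getD_set_ne _ _ _ _ _ (by omega), getD_set_self _ _ _ _ (by simp; omega)]; rfl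
        · rw [hs0i, getD_set_self _ _ _ _ (by simp; omega)]; rfl
      have hg1i : ∀ j, j < 0 + 2 → s1i.getD j 0 = (gRef m0 m1 j).2 := by
        intro j hj
        interval_cases j
        · rw [hs1i, getD_set_ne _ _ _ _ _ (by omega), getD_set_self _ _ _ _ (by simp; omega)]; rfl
        · rw [hs1i, getD_set_self _ _ _ _ (by simp; omega)]; rfl
      obtain ⟨t0, t1, hfold, ht0, ht1⟩ :=
        a_loop m0 m1 N 0 (by omega) s0i s1i (by simp [hs0i]) (by simp [hs1i]) hg0i hg1i
      rw [show ((2:Int) + ((0:Nat):Int)) = 2 by simp, hN] at hfold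
      rw [hA, hB, hfold]
      have hn1c : n - 1 = (((N-1:Nat)) : Int) := by omega
      have hn1t : (n-1).toNat = N - 1 := by omega
      simp only [List.getD_cons_zero, List.getD_cons_succ, hn1c, Int.toNat_natCast, pvIdx, PySem.List.pyGetD_natCast]
      rw [ht0 (N-1) (by omega), ht1 (N-1) (by omega)]
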